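-- pv_equiv track=rewrite | github.com/RogerioRibeiro201505534/catharanthus_roseus_2020 | pythonScripts/parse_trinotate.py | pfam_parser
-- ===== SOURCE A (Python) =====
-- def pfam_parser(pfam_annot):
--     pfam_accs = []
--     pfam_names = []
--     pfam_descriptions = []
--     pfam_hit_list = pfam_annot.split("`")
--     for hit in pfam_hit_list:
--         hit_info = hit.split("^")
--         pfam_accs.append(hit_info[0])
--         pfam_names.append(hit_info[1])
--         pfam_descriptions.append(hit_info[2])
--     return pfam_accs, pfam_names, pfam_descriptions
-- ===== SOURCE B (Python) =====
-- def pfam_parser(pfam_annot):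
--     # single char-level state machine: no split() calls at all
--     pfam_accs = []
--     pfam_names = []
--     pfam_descriptions = []
--     fields = [""]
--     for ch in pfam_annot + "`":
--         if ch == "`":
--             pfam_accs.append(fields[0])
--             pfam_names.append(fields[1])
--             pfam_descriptions.append(fields[2])
--             fields = [""]
--         elif ch == "^":
--             fields.append("")
--         else:
--             fields[-1] += ch
--     return pfam_accs, pfam_names, pfam_descriptions
-- ===== Notes on version B (the rewrite author's own statement) =====
-- stated objective: alternative
-- what changed: A splits on '`' and then re-splits each hit on '^' inside the loop; B makes no split calls at all and instead runs a single character-level state machine over pfam_annot + '`', accumulating the current hit's fields and flushing them into the three output lists at each backtick.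
-- outside the precondition, e.g. on pfam_parser('^'): A raises IndexError, B raises IndexError; on pfam_parser('`'): A raises IndexError, B raises IndexError
import Mathlib
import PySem

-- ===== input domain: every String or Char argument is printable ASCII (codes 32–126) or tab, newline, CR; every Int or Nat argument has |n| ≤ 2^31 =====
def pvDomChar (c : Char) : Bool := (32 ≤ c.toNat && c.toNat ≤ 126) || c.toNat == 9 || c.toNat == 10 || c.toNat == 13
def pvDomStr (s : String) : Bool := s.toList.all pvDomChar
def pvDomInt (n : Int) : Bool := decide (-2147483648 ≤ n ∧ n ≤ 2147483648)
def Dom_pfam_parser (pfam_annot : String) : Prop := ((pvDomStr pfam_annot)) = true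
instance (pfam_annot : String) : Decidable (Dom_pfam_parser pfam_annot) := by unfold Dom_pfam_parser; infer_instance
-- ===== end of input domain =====

-- B replaces A's two-level split (split on '`', then split each hit on '^') by a single
-- character-level state machine over the string: no split calls at all (objective: alternative).

-- ===== PORT A =====
-- hit_info[k] is Python indexing; inside Pre_ every row has ≥ 3 fields, so the
-- `.getD ""` default is never reached (outside Pre_ Python raises IndexError).
def pfam_parser (pfam_annot : String) : List String × List String × List String :=
  ((PySem.Str.split? pfam_annot "`").getD []).foldl
    (fun (st : List String × List String × List String) hit =>
      let hit_info := (PySem.Str.split? hit "^").getD []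
      (st.1 ++ [(PySem.List.pyGet? hit_info 0).getD ""],
       st.2.1 ++ [(PySem.List.pyGet? hit_info 1).getD ""],
       st.2.2 ++ [(PySem.List.pyGet? hit_info 2).getD ""]))
    ([], [], [])

-- ===== PORT B =====
-- B's Python loops over the characters of pfam_annot + "`" with state
-- (three output lists, fields); the loop body is the helper stepB. Growing
-- strings accumulate as List Char (PySem strings are List Char underneath),
-- converted by String.ofList when a hit is flushed. fields[k] / fields[-1]
-- are Python indexing → PySem.List.pyGet? (the `.getD` default is unreachable
-- inside Pre_; outside Pre_ Python raises IndexError); `fields[-1] += ch` is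
-- dropLast ++ [last ++ [ch]].
def stepB (st : (List String × List String × List String) × List (List Char)) (ch : Char) :
    (List String × List String × List String) × List (List Char) :=
  if ch = '`' then
    ((st.1.1 ++ [String.ofList ((PySem.List.pyGet? st.2 0).getD [])],
      st.1.2.1 ++ [String.ofList ((PySem.List.pyGet? st.2 1).getD [])],
      st.1.2.2 ++ [String.ofList ((PySem.List.pyGet? st.2 2).getD [])]),
     [[]])
  else if ch = '^' then
    (st.1, st.2 ++ [[]])
  else
    (st.1, st.2.dropLast ++ [((PySem.List.pyGet? st.2 (-1)).getD []) ++ [ch]])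

def pfam_parser_alt (pfam_annot : String) : List String × List String × List String :=
  ((pfam_annot.toList ++ ['`']).foldl stepB (([], [], []), [[]])).1

-- ===== PRECONDITION & SPEC =====
-- Pre_ excludes exactly the inputs on which Python A raises IndexError: a backtick-separated
-- hit with fewer than three '^'-separated fields (B raises IndexError there as well).
def Pre_pfam_parser (pfam_annot : String) : Prop :=
  ∀ hit ∈ (PySem.Str.split? pfam_annot "`").getD [], 3 ≤ ((PySem.Str.split? hit "^").getD []).length
instance (pfam_annot : String) : Decidable (Pre_pfam_parser pfam_annot) := by
  unfold Pre_pfam_parser; infer_instance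
def pvWitness_pfam_parser : String := "PF1^name1^desc1`PF2^name2^desc2"

def Spec_pfam_parser (pfam_annot : String) (out : List String × List String × List String) : Prop := out = pfam_parser_alt pfam_annot
instance (pfam_annot : String) (out : List String × List String × List String) : Decidable (Spec_pfam_parser pfam_annot out) := by unfold Spec_pfam_parser; infer_instance

-- ===== CLAIM (what is proved, stated in full; the proofs are below) =====
def Claim_equal_pfam_parser : Prop := ∀ (pfam_annot : String), Dom_pfam_parser pfam_annot → Pre_pfam_parser pfam_annot → Spec_pfam_parser pfam_annot (pfam_parser pfam_annot)

-- ===== LEMMAS AND PROOFS =====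

-- clean structural single-char split (proof-only helper)
def csplit (d : Char) : List Char → List (List Char)
  | [] => [[]]
  | c :: rest => if c = d then [] :: csplit d rest
                 else (csplit d rest).modifyHead (c :: ·)

theorem csplit_ne_nil (d : Char) (l : List Char) : csplit d l ≠ [] := by
  cases l with
  | nil => simp [csplit]
  | cons c rest =>
    simp only [csplit]
    split_ifs
    · simp
    · cases h : csplit d rest with
      | nil => exact absurd h (csplit_ne_nil d rest)
      | cons a t => simp

theorem csplit_cons (d : Char) (l : List Char) : ∃ a t, csplit d l = a :: t := by
  cases hx : csplit d l with
  | nil => exact absurd hx (csplit_ne_nil d l)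
  | cons a t => exact ⟨a, t, rfl⟩

theorem splitOn_go_single (d : Char) (fuel : Nat) :
    ∀ (l cur : List Char) (acc : List (List Char)) (_ : l.length < fuel),
    PySem.Chars.splitOn.go [d] fuel l cur acc
      = acc.reverse ++ (csplit d l).modifyHead (cur.reverse ++ ·) := by
  induction fuel with
  | zero => intro l cur acc h; omega
  | succ f ih =>
    intro l cur acc h
    cases l with
    | nil =>
      rw [PySem.Chars.splitOn.go.eq_def]
      simp [csplit]
    | cons c rest =>
      by_cases hc : c = d
      · subst hc
        have hpre : [c].isPrefixOf (c :: rest) = true := by simp [List.isPrefixOf]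
        rw [PySem.Chars.splitOn.go.eq_def]
        simp only [hpre, if_true, List.length_cons, List.length_nil,
          Nat.zero_add, List.drop_succ_cons, List.drop_zero]
        rw [ih rest [] (cur.reverse :: acc) (by simpa using Nat.lt_of_succ_lt_succ h)]
        obtain ⟨a, t, hat⟩ := csplit_cons c rest
        simp [csplit, hat]
      · have hpre : [d].isPrefixOf (c :: rest) = false := by
          simp [List.isPrefixOf]
          exact fun hdc => absurd hdc.symm hc
        rw [PySem.Chars.splitOn.go.eq_def]
        simp only [hpre, if_false, Bool.false_eq_true]
        rw [ih rest (c :: cur) acc (by simpa using Nat.lt_of_succ_lt_succ h)]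
        obtain ⟨a, t, hat⟩ := csplit_cons d rest
        simp [csplit, hat, if_neg hc]

theorem splitOn_single (d : Char) (l : List Char) :
    PySem.Chars.splitOn l [d] = csplit d l := by
  unfold PySem.Chars.splitOn
  rw [splitOn_go_single d (l.length + 1) l [] [] (Nat.lt_succ_self _)]
  obtain ⟨a, t, hat⟩ := csplit_cons d l
  simp [hat]

-- A's fold with three accumulators is the three column maps, appended to the accumulators.
theorem pfam_fold_eq_maps (l : List String) (a b c : List String) :
    l.foldl
      (fun (st : List String × List String × List String) hit =>
        let hit_info := (PySem.Str.split? hit "^").getD []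
        (st.1 ++ [(PySem.List.pyGet? hit_info 0).getD ""],
         st.2.1 ++ [(PySem.List.pyGet? hit_info 1).getD ""],
         st.2.2 ++ [(PySem.List.pyGet? hit_info 2).getD ""]))
      (a, b, c)
    = (a ++ l.map (fun h => (PySem.List.pyGet? ((PySem.Str.split? h "^").getD []) 0).getD ""),
       b ++ l.map (fun h => (PySem.List.pyGet? ((PySem.Str.split? h "^").getD []) 1).getD ""),
       c ++ l.map (fun h => (PySem.List.pyGet? ((PySem.Str.split? h "^").getD []) 2).getD "")) := by
  induction l generalizing a b c with
  | nil => simp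
  | cons x xs ih => simp [List.foldl_cons, ih]

-- the column extraction of a field list
def colC (i : Int) (h : List (List Char)) : String :=
  String.ofList ((PySem.List.pyGet? h i).getD [])

-- evaluation lemmas for stepB
theorem stepB_tick (st : (List String × List String × List String) × List (List Char)) :
    stepB st '`'
      = ((st.1.1 ++ [colC 0 st.2], st.1.2.1 ++ [colC 1 st.2], st.1.2.2 ++ [colC 2 st.2]), [[]]) := by
  simp [stepB, colC]

theorem stepB_caret (st : (List String × List String × List String) × List (List Char)) :
    stepB st '^' = (st.1, st.2 ++ [[]]) := by
  simp [stepB]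

theorem stepB_other (st : (List String × List String × List String) × List (List Char))
    (ch : Char) (h1 : ch ≠ '`') (h2 : ch ≠ '^') :
    stepB st ch = (st.1, st.2.dropLast ++ [((PySem.List.pyGet? st.2 (-1)).getD []) ++ [ch]]) := by
  simp [stepB, h1, h2]

-- the field-list trace of B's state machine (proof-only helper)
def hitsB (fs : List (List Char)) : List Char → List (List (List Char))
  | [] => [fs]
  | c :: rest =>
    if c = '`' then fs :: hitsB [[]] rest
    else if c = '^' then hitsB (fs ++ [[]]) rest
    else hitsB (fs.dropLast ++ [((PySem.List.pyGet? fs (-1)).getD []) ++ [c]]) rest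

theorem pyGet_neg_one_last (init : List (List Char)) (lastv : List Char) :
    (PySem.List.pyGet? (init ++ [lastv]) (-1)).getD [] = lastv := by
  simp [PySem.List.pyGet?, PySem.List.pyIdx?]

-- B's fold over l ++ ['`'] flushes exactly the columns of hitsB
theorem foldB_spec (l : List Char) :
    ∀ (a b c : List String) (fs : List (List Char)),
    ((l ++ ['`']).foldl stepB ((a, b, c), fs))
    = ((a ++ (hitsB fs l).map (colC 0),
        b ++ (hitsB fs l).map (colC 1),
        c ++ (hitsB fs l).map (colC 2)), [[]]) := by
  induction l with
  | nil =>
    intro a b c fs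
    simp [hitsB, stepB_tick]
  | cons x rest ih =>
    intro a b c fs
    by_cases hx : x = '`'
    · subst hx
      rw [List.cons_append, List.foldl_cons, stepB_tick, ih]
      simp [hitsB]
    · by_cases hx2 : x = '^'
      · subst hx2
        rw [List.cons_append, List.foldl_cons, stepB_caret, ih]
        simp [hitsB]
      · rw [List.cons_append, List.foldl_cons, stepB_other _ _ hx hx2, ih]
        simp [hitsB, if_neg hx, if_neg hx2]

-- hitsB computes the two-level csplit, with the pending fields merged into the first hit
theorem hitsB_eq (l : List Char) :
    ∀ (init : List (List Char)) (lastv : List Char),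
    hitsB (init ++ [lastv]) l
      = ((csplit '`' l).map (csplit '^')).modifyHead
          (fun g => init ++ g.modifyHead (lastv ++ ·)) := by
  induction l with
  | nil => intro init lastv; simp [hitsB, csplit]
  | cons c rest ih =>
    intro init lastv
    by_cases hc : c = '`'
    · subst hc
      rw [hitsB, if_pos rfl]
      rw [show ([[]] : List (List Char)) = [] ++ [[]] from rfl, ih [] []]
      obtain ⟨a, t, hat⟩ := csplit_cons '`' rest
      obtain ⟨f, fr, hffr⟩ := csplit_cons '^' a
      simp [csplit, hat, hffr]
    · by_cases hc2 : c = '^'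
      · subst hc2
        rw [hitsB, if_neg (by decide), if_pos rfl]
        rw [show (init ++ [lastv] : List (List Char)) ++ [[]]
              = (init ++ [lastv]) ++ [([] : List Char)] from rfl,
            ih (init ++ [lastv]) []]
        obtain ⟨a, t, hat⟩ := csplit_cons '`' rest
        obtain ⟨f, fr, hffr⟩ := csplit_cons '^' a
        simp [csplit, hat, hffr]
      · rw [hitsB, if_neg hc, if_neg hc2, pyGet_neg_one_last,
            List.dropLast_concat, ih init (lastv ++ [c])]
        obtain ⟨a, t, hat⟩ := csplit_cons '`' rest
        obtain ⟨f, fr, hffr⟩ := csplit_cons '^' a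
        simp [csplit, hat, hffr, if_neg hc, if_neg hc2]

theorem modifyHead_self {α : Type} (l : List α) : l.modifyHead (fun x => x) = l := by
  cases l <;> rfl

-- A's per-hit column equals colC on the char-level split
theorem colA_eq (h : List Char) (i : Int) :
    (PySem.List.pyGet? ((PySem.Str.split? (String.ofList h) "^").getD []) i).getD ""
      = colC i (csplit '^' h) := by
  have : (PySem.Str.split? (String.ofList h) "^") = some ((csplit '^' h).map String.ofList) := by
    simp [PySem.Str.split?, PySem.Chars.split?, splitOn_single]
  rw [this]
  simp only [Option.getD_some, colC]
  have hmap : PySem.List.pyGet? ((csplit '^' h).map String.ofList) i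
      = (PySem.List.pyGet? (csplit '^' h) i).map String.ofList := by
    simp [PySem.List.pyGet?, PySem.List.pyIdx?]
  rw [hmap]
  cases PySem.List.pyGet? (csplit '^' h) i with
  | none => rfl
  | some v => simp

theorem pfam_parser_spec : Claim_equal_pfam_parser := by
  intro s _ _
  show pfam_parser s = pfam_parser_alt s
  unfold pfam_parser pfam_parser_alt
  rw [foldB_spec s.toList [] [] [] [[]]]
  have hB : hitsB [[]] s.toList = (csplit '`' s.toList).map (csplit '^') := by
    have h := hitsB_eq s.toList [] []
    simpa [modifyHead_self] using h
  rw [hB]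
  have hA : (PySem.Str.split? s "`") = some ((csplit '`' s.toList).map String.ofList) := by
    simp [PySem.Str.split?, PySem.Chars.split?, splitOn_single]
  rw [hA]
  simp only [Option.getD_some]
  rw [pfam_fold_eq_maps]
  have e0 : ∀ i : Int,
      ((csplit '`' s.toList).map String.ofList).map
        (fun h => (PySem.List.pyGet? ((PySem.Str.split? h "^").getD []) i).getD "")
      = ((csplit '`' s.toList).map (csplit '^')).map (colC i) := by
    intro i
    rw [List.map_map, List.map_map]
    exact List.map_congr_left (fun h _ => colA_eq h i)
  simp only [List.nil_append]
  exact congrArg₂ Prod.mk (e0 0) (congrArg₂ Prod.mk (e0 1) (e0 2))
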